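-- pv_equiv track=rewrite | github.com/S0jer/algorithms-and-data-structures-course-2022 | BitAlgo/BIT_Algo_graph_0/2. Wiadomość.py | message
-- ===== SOURCE A (Python) =====
-- from queue import Queue
--
-- def message(connections, n):
--     G = [[] for _ in range(n)]
--     for i in range(len(connections)):
--         G[connections[i][0]].append(connections[i][1])
--         G[connections[i][1]].append(connections[i][0])
--
--     visited = [False for _ in range(n)]
--     messCnt = [0 for _ in range(n + 1)]
--
--     Q = Queue()
--
--     Q.put((1, 0))
--
--     while not Q.empty():
--         day, u = Q.get()
--         if visited[u] is False:
--             messCnt[day] += 1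
--         visited[u] = True
--
--         for i in G[u]:
--             if visited[i] is False:
--                 Q.put((day + 1, i))
--
--     result = (-1, -1)
--     for i in range(n + 1):
--         if messCnt[i] > result[1]:
--             result = (i, messCnt[i])
--
--     return result
-- ===== SOURCE B (Python) =====
-- def message(connections, n):
--     G = [[] for _ in range(n)]
--     for c in connections:
--         G[c[0]].append(c[1])
--         G[c[1]].append(c[0])
--
--     visited = [False] * n
--     visited[0] = True
--     messCnt = [0] * (n + 1)
--     messCnt[1] = 1
--
--     frontier = [0]
--     day = 2
--     while frontier:
--         nxt = []
--         for u in frontier: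
--             for v in G[u]:
--                 if not visited[v]:
--                     visited[v] = True
--                     nxt.append(v)
--         if nxt:
--             messCnt[day] = len(nxt)
--         day += 1
--         frontier = nxt
--
--     result = (-1, -1)
--     for i in range(n + 1):
--         if messCnt[i] > result[1]:
--             result = (i, messCnt[i])
--     return result
-- ===== Notes on version B (the rewrite author's own statement) =====
-- stated objective: alternative
-- what changed: A runs BFS with a FIFO queue of (day, node) pairs, re-enqueueing and re-processing duplicate entries for not-yet-dequeued nodes; B runs a level-synchronous BFS over whole frontiers, marking nodes visited at discovery so each node is processed once, then does the same arg-max scan.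
import Mathlib
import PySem

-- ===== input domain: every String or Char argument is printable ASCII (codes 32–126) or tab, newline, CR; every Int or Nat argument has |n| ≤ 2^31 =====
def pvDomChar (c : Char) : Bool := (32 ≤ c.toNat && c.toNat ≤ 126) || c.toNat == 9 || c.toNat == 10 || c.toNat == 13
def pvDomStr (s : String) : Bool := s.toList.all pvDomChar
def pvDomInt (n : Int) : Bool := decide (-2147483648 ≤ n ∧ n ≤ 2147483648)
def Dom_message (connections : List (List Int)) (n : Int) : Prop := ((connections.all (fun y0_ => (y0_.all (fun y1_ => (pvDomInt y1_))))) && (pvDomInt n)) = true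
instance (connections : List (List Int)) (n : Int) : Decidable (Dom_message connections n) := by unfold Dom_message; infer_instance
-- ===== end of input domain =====

-- B replaces A's per-(day,node) FIFO queue (which re-enqueues and re-processes duplicate entries)
-- by a level-synchronous BFS over whole frontiers, marking nodes visited as they are discovered;
-- the graph build and the final arg-max scan are the same, so the returned pair is identical.

-- ===== PORT A =====
-- Python list indexing visited[u] / G[u] wraps a negative index (this is exact for -n ≤ u < n;
-- out-of-range indices raise in Python and are excluded by Pre_message).
def cellIdx (n u : Int) : Nat := (if u < 0 then u + n else u).toNat
def getCell (vis : List Bool) (n u : Int) : Bool := vis.getD (cellIdx n u) false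
def setCell (vis : List Bool) (n u : Int) : List Bool := vis.set (cellIdx n u) true
def getRow (G : List (List Int)) (n u : Int) : List Int := G.getD (cellIdx n u) []
def appendAt (G : List (List Int)) (n a b : Int) : List (List Int) := G.set (cellIdx n a) (getRow G n a ++ [b])
-- G[connections[i][0]].append(connections[i][1]); G[connections[i][1]].append(connections[i][0])
def buildG (connections : List (List Int)) (n : Int) : List (List Int) :=
  connections.foldl
    (fun G c => appendAt (appendAt G n (c.getD 0 0) (c.getD 1 0)) n (c.getD 1 0) (c.getD 0 0))
    (List.replicate n.toNat [])
-- the final scan 'for i in range(n+1): if messCnt[i] > result[1]: result = (i, messCnt[i])'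
-- (textually identical in A and in B, hence one shared helper)
def finalScan (n : Int) (mc : List Int) : Int × Int :=
  (PySem.List.pyRange 0 (n+1) 1).foldl
    (fun r i => if mc.getD i.toNat 0 > r.2 then (i, mc.getD i.toNat 0) else r) (-1, -1)
-- A's while-loop over the FIFO queue of (day, node) pairs; the fuel is a totality guard only
-- (proved sufficient under Pre_message), each step is exactly one Q.get.
def loopA (G : List (List Int)) (n : Int) : Nat → List Bool → List Int → List (Int × Int) → List Int
  | 0, _, mc, _ => mc
  | _ + 1, _, mc, [] => mc
  | f + 1, vis, mc, (day, u) :: rest =>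
    let mc' := if getCell vis n u = false then mc.set day.toNat (mc.getD day.toNat 0 + 1) else mc
    let vis' := setCell vis n u
    loopA G n f vis' mc'
      (rest ++ ((getRow G n u).filter (fun i => getCell vis' n i = false)).map (fun i => (day + 1, i)))

def message (connections : List (List Int)) (n : Int) : Int × Int :=
  let G := buildG connections n
  finalScan n (loopA G n ((2 * connections.length + 2) ^ (n.toNat + 2))
    (List.replicate n.toNat false) (List.replicate (n.toNat + 1) 0) [(1, 0)])

-- ===== PORT B =====
-- 'for v in G[u]: if not visited[v]: visited[v] = True; nxt.append(v)'
def collectRow (n : Int) (vis : List Bool) (acc : List Int) (row : List Int) : List Bool × List Int :=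
  row.foldl (fun p x => if getCell p.1 n x = false then (setCell p.1 n x, p.2 ++ [x]) else p) (vis, acc)
-- 'nxt = []; for u in frontier: …'
def collect (G : List (List Int)) (n : Int) (vis : List Bool) (frontier : List Int) : List Bool × List Int :=
  frontier.foldl (fun p u => collectRow n p.1 p.2 (getRow G n u)) (vis, [])
-- B's 'while frontier:' loop; fuel n+2 is a totality guard (each nonempty frontier visits ≥ 1 new node).
def loopB (G : List (List Int)) (n : Int) : Nat → List Bool → List Int → List Int → Int → List Int
  | 0, _, mc, _, _ => mc
  | f + 1, vis, mc, frontier, day =>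
    if frontier.isEmpty then mc
    else
      let p := collect G n vis frontier
      let mc' := if p.2.isEmpty then mc else mc.set day.toNat (p.2.length : Int)
      loopB G n f p.1 mc' p.2 (day + 1)

def message_alt (connections : List (List Int)) (n : Int) : Int × Int :=
  let G := buildG connections n
  finalScan n (loopB G n (n.toNat + 2)
    ((List.replicate n.toNat false).set 0 true)
    ((List.replicate (n.toNat + 1) (0 : Int)).set 1 1) [0] 2)

-- ===== PRECONDITION & SPEC =====
-- Pre_message is exactly where the Python A returns normally: n ≥ 1 (else visited[0] / G[...]
-- raises IndexError), every connection has ≥ 2 entries (else connections[i][1] raises), and both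
-- endpoints lie in Python's accepted index range [-n, n) (else G[...] raises IndexError).
def Pre_message (connections : List (List Int)) (n : Int) : Prop :=
  1 ≤ n ∧ ∀ c ∈ connections,
    2 ≤ c.length ∧ -n ≤ c.getD 0 0 ∧ c.getD 0 0 < n ∧ -n ≤ c.getD 1 0 ∧ c.getD 1 0 < n
instance (connections : List (List Int)) (n : Int) : Decidable (Pre_message connections n) := by
  unfold Pre_message; infer_instance
def pvWitness_message : List (List Int) × Int := ([[0, 1], [1, 2], [0, 2]], 4)

def Spec_message (connections : List (List Int)) (n : Int) (out : Int × Int) : Prop := out = message_alt connections n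
instance (connections : List (List Int)) (n : Int) (out : Int × Int) : Decidable (Spec_message connections n out) := by unfold Spec_message; infer_instance

-- ===== CLAIM (what is proved, stated in full; the proofs are below) =====
def Claim_equal_message : Prop := ∀ (connections : List (List Int)) (n : Int), Dom_message connections n → Pre_message connections n → Spec_message connections n (message connections n)

-- ===== LEMMAS AND PROOFS =====

-- ---- generic list lemmas ----
theorem pvGetD_oob {α : Type} (l : List α) {i : Nat} (d : α) (h : l.length ≤ i) : l.getD i d = d := by
  simp [List.getD_eq_getElem?_getD, List.getElem?_eq_none h]

theorem pvGetD_set_self {α : Type} (l : List α) {i : Nat} (a d : α) (h : i < l.length) :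
    (l.set i a).getD i d = a := by
  simp [List.getD_eq_getElem?_getD, List.getElem?_set_self, h]

theorem pvGetD_set_ne {α : Type} (l : List α) {i j : Nat} (a d : α) (h : i ≠ j) :
    (l.set i a).getD j d = l.getD j d := by
  simp [List.getD_eq_getElem?_getD, List.getElem?_set_ne h]

theorem pvSet_oob {α : Type} (l : List α) {i : Nat} (a : α) (h : l.length ≤ i) : l.set i a = l :=
  List.set_eq_of_length_le h

theorem pvSet_getD_self {α : Type} (l : List α) (i : Nat) (d : α) : l.set i (l.getD i d) = l := by
  induction l generalizing i with
  | nil => simp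
  | cons b t ih => cases i with
    | zero => simp [List.getD_cons_zero]
    | succ j =>
      have := ih j
      simp only [List.getD_cons_succ, List.set_cons_succ, this]

theorem pvEq_of_getD {α : Type} (d : α) (l₁ l₂ : List α) (hlen : l₁.length = l₂.length)
    (h : ∀ c, l₁.getD c d = l₂.getD c d) : l₁ = l₂ := by
  apply List.ext_getElem hlen
  intro i h1 h2
  have := h i
  simpa [List.getD_eq_getElem?_getD, List.getElem?_eq_getElem, h1, h2] using this

theorem pvCount_false_set_true (l : List Bool) {i : Nat} (h : i < l.length)
    (hf : l.getD i false = false) : l.count false = (l.set i true).count false + 1 := by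
  induction l generalizing i with
  | nil => simp at h
  | cons b t ih =>
    cases i with
    | zero =>
      simp only [List.getD_cons_zero] at hf
      subst hf; simp [List.count_cons]
    | succ j =>
      simp only [List.length_cons, Nat.succ_lt_succ_iff] at h
      simp only [List.getD_cons_succ] at hf
      simp only [List.set_cons_succ, List.count_cons]
      rw [ih h hf]; omega

theorem pvGetD_true_lt (l : List Bool) {c : Nat} (h : l.getD c false = true) : c < l.length := by
  by_contra hc
  rw [pvGetD_oob l false (by omega)] at h
  exact Bool.false_ne_true h

theorem pvSet_true_of_getD (l : List Bool) {i : Nat} (h : l.getD i false = true) :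
    l.set i true = l := by
  conv_rhs => rw [← pvSet_getD_self l i false]
  rw [h]

theorem pvGetD_set_true_mono (l : List Bool) (i : Nat) {c : Nat}
    (h : l.getD c false = true) : (l.set i true).getD c false = true := by
  by_cases hic : i = c
  · subst hic; rw [pvGetD_set_self l true false (pvGetD_true_lt l h)]
  · rw [pvGetD_set_ne l true false hic]; exact h

-- ---- cell index lemmas ----
theorem cellIdx_lt {n x : Int} (h1 : -n ≤ x) (h2 : x < n) : cellIdx n x < n.toNat := by
  unfold cellIdx; split <;> omega

theorem getRow_congr (G : List (List Int)) (n : Int) {u v : Int}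
    (h : cellIdx n u = cellIdx n v) : getRow G n u = getRow G n v := by
  unfold getRow; rw [h]

-- ---- A's loop processes one whole day-block at a time ----
def pstep (G : List (List Int)) (n day : Int) (st : List Bool × List Int × List Int) (u : Int) :
    List Bool × List Int × List Int :=
  (setCell st.1 n u,
   (if getCell st.1 n u = false then st.2.1.set day.toNat (st.2.1.getD day.toNat 0 + 1) else st.2.1),
   st.2.2 ++ (getRow G n u).filter (fun i => getCell (setCell st.1 n u) n i = false))

def procBlock (G : List (List Int)) (n day : Int) (st : List Bool × List Int × List Int)
    (S : List Int) : List Bool × List Int × List Int :=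
  S.foldl (pstep G n day) st

theorem procBlock_cons (G : List (List Int)) (n day : Int) (st : List Bool × List Int × List Int)
    (u : Int) (S : List Int) :
    procBlock G n day st (u :: S) = procBlock G n day (pstep G n day st u) S := rfl

theorem loopA_nil (G : List (List Int)) (n : Int) {f : Nat} (vis : List Bool) (mc : List Int)
    (hf : 1 ≤ f) : loopA G n f vis mc [] = mc := by
  cases f with
  | zero => omega
  | succ f' => rfl

theorem loopA_block (G : List (List Int)) (n day : Int) :
    ∀ (S : List Int) (f : Nat) (vis : List Bool) (mc acc : List Int),
    loopA G n (S.length + f) vis mc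
      (S.map (fun u => (day, u)) ++ acc.map (fun u => (day + 1, u))) =
    loopA G n f (procBlock G n day (vis, mc, acc) S).1 (procBlock G n day (vis, mc, acc) S).2.1
      ((procBlock G n day (vis, mc, acc) S).2.2.map (fun u => (day + 1, u))) := by
  intro S
  induction S with
  | nil => intro f vis mc acc; simp [procBlock]
  | cons u S ih =>
    intro f vis mc acc
    have hlen : (u :: S).length + f = (S.length + f) + 1 := by simp; omega
    rw [hlen]
    show loopA G n ((S.length + f) + 1) vis mc
        ((day, u) :: (S.map (fun u => (day, u)) ++ acc.map (fun u => (day + 1, u)))) = _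
    rw [show loopA G n ((S.length + f) + 1) vis mc
        ((day, u) :: (S.map (fun u => (day, u)) ++ acc.map (fun u => (day + 1, u)))) =
        loopA G n (S.length + f) (setCell vis n u)
          (if getCell vis n u = false then mc.set day.toNat (mc.getD day.toNat 0 + 1) else mc)
          ((S.map (fun u => (day, u)) ++ acc.map (fun u => (day + 1, u))) ++
            ((getRow G n u).filter (fun i => getCell (setCell vis n u) n i = false)).map
              (fun i => (day + 1, i))) from rfl]
    rw [List.append_assoc, ← List.map_append]
    rw [ih f (setCell vis n u) _ (acc ++ (getRow G n u).filter (fun i => getCell (setCell vis n u) n i = false))]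
    rfl


theorem pvNeFalse {b : Bool} (h : b ≠ false) : b = true := by
  cases b with
  | false => exact absurd rfl h
  | true => rfl

-- ---- procBlock invariants ----
theorem procBlock_vis_len (G : List (List Int)) (n day : Int) :
    ∀ (S : List Int) (st : List Bool × List Int × List Int),
    (procBlock G n day st S).1.length = st.1.length := by
  intro S
  induction S with
  | nil => intro st; rfl
  | cons u S ih =>
    intro st
    rw [procBlock_cons, ih]
    simp [pstep, setCell]

theorem procBlock_vis_mono (G : List (List Int)) (n day : Int) :
    ∀ (S : List Int) (st : List Bool × List Int × List Int) (c : Nat),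
    st.1.getD c false = true → (procBlock G n day st S).1.getD c false = true := by
  intro S
  induction S with
  | nil => intro st c h; exact h
  | cons u S ih =>
    intro st c h
    rw [procBlock_cons]
    exact ih _ c (pvGetD_set_true_mono st.1 (cellIdx n u) h)

theorem procBlock_acc_mono (G : List (List Int)) (n day : Int) :
    ∀ (S : List Int) (st : List Bool × List Int × List Int) (x : Int),
    x ∈ st.2.2 → x ∈ (procBlock G n day st S).2.2 := by
  intro S
  induction S with
  | nil => intro st x h; exact h
  | cons u S ih =>
    intro st x h
    rw [procBlock_cons]
    exact ih _ x (by simp [pstep, h])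

theorem procBlock_vis_getD (G : List (List Int)) (n day : Int) :
    ∀ (S : List Int) (st : List Bool × List Int × List Int),
    (∀ u ∈ S, cellIdx n u < st.1.length) → ∀ c : Nat,
    (procBlock G n day st S).1.getD c false
      = (st.1.getD c false || S.any (fun u => cellIdx n u == c)) := by
  intro S
  induction S with
  | nil => intro st _ c; simp [procBlock]
  | cons u S ih =>
    intro st hS c
    rw [procBlock_cons]
    have hlen : (pstep G n day st u).1.length = st.1.length := by simp [pstep, setCell]
    rw [ih _ (fun v hv => by rw [hlen]; exact hS v (List.mem_cons_of_mem _ hv)) c]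
    have hstep : (pstep G n day st u).1.getD c false
        = (st.1.getD c false || (cellIdx n u == c)) := by
      simp only [pstep, setCell]
      by_cases hc : cellIdx n u = c
      · subst hc
        rw [pvGetD_set_self _ _ _ (hS u (List.mem_cons_self))]
        simp
      · rw [pvGetD_set_ne _ _ _ hc]
        simp [hc]
    rw [hstep]
    simp [Bool.or_assoc]

theorem procBlock_mc (G : List (List Int)) (n day : Int) :
    ∀ (S : List Int) (st : List Bool × List Int × List Int),
    (∀ u ∈ S, cellIdx n u < st.1.length) →
    ∃ f : Nat,
      (procBlock G n day st S).2.1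
        = st.2.1.set day.toNat (st.2.1.getD day.toNat 0 + (f : Int)) ∧
      st.1.count false = (procBlock G n day st S).1.count false + f := by
  intro S
  induction S with
  | nil =>
    intro st _
    refine ⟨0, ?_, by simp [procBlock]⟩
    simp only [procBlock, List.foldl_nil, Nat.cast_zero, add_zero]
    exact (pvSet_getD_self _ _ _).symm
  | cons u S ih =>
    intro st hS
    rw [procBlock_cons]
    have hlen : (pstep G n day st u).1.length = st.1.length := by simp [pstep, setCell]
    obtain ⟨f, hmc, hcnt⟩ := ih _ (fun v hv => by rw [hlen]; exact hS v (List.mem_cons_of_mem _ hv))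
    by_cases hv : getCell st.1 n u = false
    · -- u is newly visited: one mc increment, one false→true flip
      have hcu : cellIdx n u < st.1.length := hS u (List.mem_cons_self)
      have hstep1 : (pstep G n day st u).1 = st.1.set (cellIdx n u) true := by simp [pstep, setCell]
      have hstep2 : (pstep G n day st u).2.1
          = st.2.1.set day.toNat (st.2.1.getD day.toNat 0 + 1) := by simp [pstep, hv]
      refine ⟨f + 1, ?_, ?_⟩
      · rw [hmc, hstep2]
        rcases lt_or_ge day.toNat st.2.1.length with hd | hd
        · rw [pvGetD_set_self _ _ _ hd, List.set_set]
          push_cast; ring_nf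
        · rw [pvSet_oob _ _ hd, pvSet_oob _ _ hd, pvSet_oob _ _ (by simpa [List.length_set] using hd)]
      · rw [hstep1] at hcnt
        have := pvCount_false_set_true st.1 hcu hv
        omega
    · -- u already visited: nothing changes
      have hvt : st.1.getD (cellIdx n u) false = true := by
        unfold getCell at hv
        exact pvNeFalse hv
      have hstep1 : (pstep G n day st u).1 = st.1 := by
        simp [pstep, setCell, pvSet_true_of_getD st.1 hvt]
      have hstep2 : (pstep G n day st u).2.1 = st.2.1 := by simp [pstep, hv]
      refine ⟨f, ?_, ?_⟩
      · rw [hmc, hstep2]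
      · rw [hstep1] at hcnt; exact hcnt

theorem procBlock_acc_sub (G : List (List Int)) (n day : Int) (vis0 : List Bool) :
    ∀ (S : List Int) (st : List Bool × List Int × List Int),
    (∀ c : Nat, vis0.getD c false = true → st.1.getD c false = true) →
    ∀ x ∈ (procBlock G n day st S).2.2,
      x ∈ st.2.2 ∨ ∃ u ∈ S, x ∈ getRow G n u ∧ getCell vis0 n x = false := by
  intro S
  induction S with
  | nil => intro st _ x hx; exact Or.inl hx
  | cons u S ih =>
    intro st hmono x hx
    rw [procBlock_cons] at hx
    have hmono' : ∀ c : Nat, vis0.getD c false = true → (pstep G n day st u).1.getD c false = true := by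
      intro c hc
      simp only [pstep, setCell]
      exact pvGetD_set_true_mono _ _ (hmono c hc)
    rcases ih _ hmono' x hx with hin | ⟨v, hv, hrow, hcell⟩
    · simp only [pstep, List.mem_append, List.mem_filter] at hin
      rcases hin with hin | ⟨hrow, hcond⟩
      · exact Or.inl hin
      · refine Or.inr ⟨u, List.mem_cons_self, hrow, ?_⟩
        simp only [decide_eq_true_eq] at hcond
        by_contra hc0
        have hc0' : getCell vis0 n x = true := pvNeFalse hc0
        unfold getCell at hc0'
        have := hmono' _ hc0'
        simp only [pstep, setCell] at this
        unfold getCell setCell at hcond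
        rw [this] at hcond
        simp at hcond
    · exact Or.inr ⟨v, List.mem_cons_of_mem _ hv, hrow, hcell⟩

theorem procBlock_acc_super (G : List (List Int)) (n day : Int) :
    ∀ (S : List Int) (st : List Bool × List Int × List Int),
    ∀ u ∈ S, ∀ x ∈ getRow G n u,
    getCell (procBlock G n day st S).1 n x = false → x ∈ (procBlock G n day st S).2.2 := by
  intro S
  induction S with
  | nil => intro st u hu; simp at hu
  | cons v S ih =>
    intro st u hu x hx hcell
    rw [procBlock_cons] at hcell ⊢
    rcases List.mem_cons.mp hu with rfl | hu'
    · by_cases hc : getCell (setCell st.1 n u) n x = false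
      · apply procBlock_acc_mono
        simp only [pstep, List.mem_append, List.mem_filter]
        exact Or.inr ⟨hx, by simp [hc]⟩
      · exfalso
        have hct : getCell (setCell st.1 n u) n x = true := pvNeFalse hc
        have : (pstep G n day st u).1.getD (cellIdx n x) false = true := hct
        have := procBlock_vis_mono G n day S _ _ this
        unfold getCell at hcell
        rw [this] at hcell
        simp at hcell
    · exact ih _ u hu' x hx hcell

theorem procBlock_acc_len (G : List (List Int)) (n day : Int) (L : Nat)
    (hG : ∀ u : Int, (getRow G n u).length ≤ L) :
    ∀ (S : List Int) (st : List Bool × List Int × List Int),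
    (procBlock G n day st S).2.2.length ≤ st.2.2.length + S.length * L := by
  intro S
  induction S with
  | nil => intro st; simp [procBlock]
  | cons u S ih =>
    intro st
    rw [procBlock_cons]
    have h1 := ih (pstep G n day st u)
    have h2 : (pstep G n day st u).2.2.length ≤ st.2.2.length + L := by
      simp only [pstep, List.length_append]
      have := List.length_filter_le (fun i => getCell (setCell st.1 n u) n i = false) (getRow G n u)
      have := hG u
      omega
    have : (u :: S).length * L = S.length * L + L := by
      simp [List.length_cons]; ring
    omega

-- ---- collectRow invariants (B's inner loop) ----
theorem collectRow_vis_len (n : Int) :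
    ∀ (row : List Int) (vis : List Bool) (acc : List Int),
    (collectRow n vis acc row).1.length = vis.length := by
  intro row
  induction row with
  | nil => intro vis acc; rfl
  | cons x r ih =>
    intro vis acc
    show (List.foldl _ (if getCell vis n x = false then (setCell vis n x, acc ++ [x]) else (vis, acc)) r).1.length = _
    split
    · rw [show (List.foldl (fun p x => if getCell p.1 n x = false then (setCell p.1 n x, p.2 ++ [x]) else p) (setCell vis n x, acc ++ [x]) r) = collectRow n (setCell vis n x) (acc ++ [x]) r from rfl, ih]
      simp [setCell]
    · exact ih vis acc

theorem collectRow_cons (n : Int) (vis : List Bool) (acc : List Int) (x : Int) (r : List Int) :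
    collectRow n vis acc (x :: r)
      = if getCell vis n x = false then collectRow n (setCell vis n x) (acc ++ [x]) r
        else collectRow n vis acc r := by
  show (List.foldl _ (if getCell vis n x = false then (setCell vis n x, acc ++ [x]) else (vis, acc)) r) = _
  split <;> rfl

theorem collectRow_acc_mono (n : Int) :
    ∀ (row : List Int) (vis : List Bool) (acc : List Int) (y : Int),
    y ∈ acc → y ∈ (collectRow n vis acc row).2 := by
  intro row
  induction row with
  | nil => intro vis acc y h; exact h
  | cons x r ih =>
    intro vis acc y h
    rw [collectRow_cons]
    split
    · exact ih _ _ y (by simp [h])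
    · exact ih _ _ y h

theorem collectRow_vis_mono (n : Int) :
    ∀ (row : List Int) (vis : List Bool) (acc : List Int) (c : Nat),
    vis.getD c false = true → (collectRow n vis acc row).1.getD c false = true := by
  intro row
  induction row with
  | nil => intro vis acc c h; exact h
  | cons x r ih =>
    intro vis acc c h
    rw [collectRow_cons]
    split
    · exact ih _ _ c (pvGetD_set_true_mono vis (cellIdx n x) h)
    · exact ih _ _ c h

theorem collectRow_vis_getD (n : Int) :
    ∀ (row : List Int) (vis : List Bool) (acc : List Int),
    (∀ x ∈ row, cellIdx n x < vis.length) → ∀ c : Nat,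
    (collectRow n vis acc row).1.getD c false
      = (vis.getD c false || row.any (fun x => cellIdx n x == c)) := by
  intro row
  induction row with
  | nil => intro vis acc _ c; simp [collectRow]
  | cons x r ih =>
    intro vis acc hr c
    rw [collectRow_cons]
    by_cases hv : getCell vis n x = false
    · rw [if_pos hv]
      rw [ih _ _ (fun y hy => by
        simpa [setCell] using hr y (List.mem_cons_of_mem _ hy)) c]
      have : (setCell vis n x).getD c false = (vis.getD c false || (cellIdx n x == c)) := by
        unfold setCell
        by_cases hc : cellIdx n x = c
        · subst hc; rw [pvGetD_set_self _ _ _ (hr x List.mem_cons_self)]; simp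
        · rw [pvGetD_set_ne _ _ _ hc]; simp [hc]
      rw [this]
      simp [Bool.or_assoc]
    · rw [if_neg hv]
      rw [ih _ _ (fun y hy => hr y (List.mem_cons_of_mem _ hy)) c]
      have hvt : vis.getD (cellIdx n x) false = true := pvNeFalse (by exact hv)
      rw [List.any_cons]
      by_cases hc : cellIdx n x = c
      · subst hc
        rw [hvt]
        simp [List.getD_eq_getElem?_getD] at hvt ⊢
      · have hb : (cellIdx n x == c) = false := by simp [hc]
        rw [hb]
        simp

theorem collectRow_count (n : Int) :
    ∀ (row : List Int) (vis : List Bool) (acc : List Int),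
    (∀ x ∈ row, cellIdx n x < vis.length) →
    (collectRow n vis acc row).1.count false + (collectRow n vis acc row).2.length
      = vis.count false + acc.length := by
  intro row
  induction row with
  | nil => intro vis acc _; rfl
  | cons x r ih =>
    intro vis acc hr
    rw [collectRow_cons]
    by_cases hv : getCell vis n x = false
    · rw [if_pos hv]
      rw [ih _ _ (fun y hy => by simpa [setCell] using hr y (List.mem_cons_of_mem _ hy))]
      have := pvCount_false_set_true vis (hr x List.mem_cons_self) hv
      unfold setCell
      simp only [List.length_append, List.length_cons, List.length_nil]
      omega
    · rw [if_neg hv]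
      exact ih _ _ (fun y hy => hr y (List.mem_cons_of_mem _ hy))

theorem collectRow_acc_sub (n : Int) (vis0 : List Bool) :
    ∀ (row : List Int) (vis : List Bool) (acc : List Int),
    (∀ c : Nat, vis0.getD c false = true → vis.getD c false = true) →
    ∀ y ∈ (collectRow n vis acc row).2,
      y ∈ acc ∨ (y ∈ row ∧ getCell vis0 n y = false) := by
  intro row
  induction row with
  | nil => intro vis acc _ y hy; exact Or.inl hy
  | cons x r ih =>
    intro vis acc hmono y hy
    rw [collectRow_cons] at hy
    by_cases hv : getCell vis n x = false
    · rw [if_pos hv] at hy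
      have hmono' : ∀ c : Nat, vis0.getD c false = true → (setCell vis n x).getD c false = true :=
        fun c hc => pvGetD_set_true_mono vis (cellIdx n x) (hmono c hc)
      rcases ih _ _ hmono' y hy with hin | ⟨hr, hc⟩
      · rcases List.mem_append.mp hin with hin | hin
        · exact Or.inl hin
        · have : y = x := by simpa using hin
          subst this
          refine Or.inr ⟨List.mem_cons_self, ?_⟩
          by_contra hc0
          have := hmono _ (pvNeFalse (show getCell vis0 n y ≠ false from hc0))
          unfold getCell at hv
          rw [this] at hv; simp at hv
      · exact Or.inr ⟨List.mem_cons_of_mem _ hr, hc⟩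
    · rw [if_neg hv] at hy
      rcases ih _ _ hmono y hy with hin | ⟨hr, hc⟩
      · exact Or.inl hin
      · exact Or.inr ⟨List.mem_cons_of_mem _ hr, hc⟩

theorem collectRow_c (n : Int) :
    ∀ (row : List Int) (vis : List Bool) (acc : List Int) (c : Nat),
    vis.getD c false = false → (collectRow n vis acc row).1.getD c false = true →
    ∃ y ∈ (collectRow n vis acc row).2, cellIdx n y = c := by
  intro row
  induction row with
  | nil => intro vis acc c h0 h1; rw [show (collectRow n vis acc []).1 = vis from rfl] at h1; rw [h0] at h1; simp at h1
  | cons x r ih =>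
    intro vis acc c h0 h1
    rw [collectRow_cons] at h1 ⊢
    by_cases hv : getCell vis n x = false
    · rw [if_pos hv] at h1 ⊢
      by_cases hc : cellIdx n x = c
      · exact ⟨x, collectRow_acc_mono n r _ _ x (by simp), hc⟩
      · have h0' : (setCell vis n x).getD c false = false := by
          unfold setCell; rw [pvGetD_set_ne _ _ _ hc]; exact h0
        exact ih _ _ c h0' h1
    · rw [if_neg hv] at h1 ⊢
      exact ih _ _ c h0 h1

-- ---- collect invariants (B's frontier loop) ----
def cfold (G : List (List Int)) (n : Int) (p : List Bool × List Int) (fr : List Int) :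
    List Bool × List Int :=
  fr.foldl (fun p u => collectRow n p.1 p.2 (getRow G n u)) p

theorem cfold_cons (G : List (List Int)) (n : Int) (p : List Bool × List Int) (u : Int) (fr : List Int) :
    cfold G n p (u :: fr) = cfold G n (collectRow n p.1 p.2 (getRow G n u)) fr := rfl

theorem cfold_vis_len (G : List (List Int)) (n : Int) :
    ∀ (fr : List Int) (p : List Bool × List Int), (cfold G n p fr).1.length = p.1.length := by
  intro fr
  induction fr with
  | nil => intro p; rfl
  | cons u fr ih => intro p; rw [cfold_cons, ih, collectRow_vis_len]

theorem cfold_acc_mono (G : List (List Int)) (n : Int) :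
    ∀ (fr : List Int) (p : List Bool × List Int) (y : Int), y ∈ p.2 → y ∈ (cfold G n p fr).2 := by
  intro fr
  induction fr with
  | nil => intro p y h; exact h
  | cons u fr ih =>
    intro p y h
    rw [cfold_cons]
    exact ih _ y (collectRow_acc_mono n _ _ _ y h)

theorem cfold_vis_getD (G : List (List Int)) (n : Int) :
    ∀ (fr : List Int) (p : List Bool × List Int),
    (∀ u ∈ fr, ∀ x ∈ getRow G n u, cellIdx n x < p.1.length) → ∀ c : Nat,
    (cfold G n p fr).1.getD c false
      = (p.1.getD c false || fr.any (fun u => (getRow G n u).any (fun x => cellIdx n x == c))) := by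
  intro fr
  induction fr with
  | nil => intro p _ c; simp [cfold]
  | cons u fr ih =>
    intro p hfr c
    rw [cfold_cons]
    rw [ih _ (fun v hv x hx => by
      rw [collectRow_vis_len]
      exact hfr v (List.mem_cons_of_mem _ hv) x hx) c]
    rw [collectRow_vis_getD n _ _ _ (fun x hx => hfr u List.mem_cons_self x hx) c]
    simp [Bool.or_assoc]

theorem cfold_count (G : List (List Int)) (n : Int) :
    ∀ (fr : List Int) (p : List Bool × List Int),
    (∀ u ∈ fr, ∀ x ∈ getRow G n u, cellIdx n x < p.1.length) →
    (cfold G n p fr).1.count false + (cfold G n p fr).2.length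
      = p.1.count false + p.2.length := by
  intro fr
  induction fr with
  | nil => intro p _; rfl
  | cons u fr ih =>
    intro p hfr
    rw [cfold_cons]
    rw [ih _ (fun v hv x hx => by
      rw [collectRow_vis_len]
      exact hfr v (List.mem_cons_of_mem _ hv) x hx)]
    exact collectRow_count n _ _ _ (fun x hx => hfr u List.mem_cons_self x hx)

theorem cfold_acc_sub (G : List (List Int)) (n : Int) (vis0 : List Bool) :
    ∀ (fr : List Int) (p : List Bool × List Int),
    (∀ c : Nat, vis0.getD c false = true → p.1.getD c false = true) →
    ∀ y ∈ (cfold G n p fr).2,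
      y ∈ p.2 ∨ ∃ u ∈ fr, y ∈ getRow G n u ∧ getCell vis0 n y = false := by
  intro fr
  induction fr with
  | nil => intro p _ y hy; exact Or.inl hy
  | cons u fr ih =>
    intro p hmono y hy
    rw [cfold_cons] at hy
    have hmono' : ∀ c : Nat, vis0.getD c false = true →
        (collectRow n p.1 p.2 (getRow G n u)).1.getD c false = true :=
      fun c hc => collectRow_vis_mono n _ _ _ c (hmono c hc)
    rcases ih _ hmono' y hy with hin | ⟨v, hv, hrow, hc⟩
    · rcases collectRow_acc_sub n vis0 _ _ _ hmono y hin with hin' | ⟨hrow, hc⟩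
      · exact Or.inl hin'
      · exact Or.inr ⟨u, List.mem_cons_self, hrow, hc⟩
    · exact Or.inr ⟨v, List.mem_cons_of_mem _ hv, hrow, hc⟩

theorem cfold_c (G : List (List Int)) (n : Int) :
    ∀ (fr : List Int) (p : List Bool × List Int) (c : Nat),
    p.1.getD c false = false → (cfold G n p fr).1.getD c false = true →
    ∃ y ∈ (cfold G n p fr).2, cellIdx n y = c := by
  intro fr
  induction fr with
  | nil => intro p c h0 h1; rw [show (cfold G n p []).1 = p.1 from rfl] at h1; rw [h0] at h1; simp at h1
  | cons u fr ih =>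
    intro p c h0 h1
    rw [cfold_cons] at h1 ⊢
    by_cases hmid : (collectRow n p.1 p.2 (getRow G n u)).1.getD c false = true
    · obtain ⟨y, hy, hcy⟩ := collectRow_c n _ _ _ c h0 hmid
      exact ⟨y, cfold_acc_mono G n fr _ y hy, hcy⟩
    · have h0' : (collectRow n p.1 p.2 (getRow G n u)).1.getD c false = false := by
        cases h : (collectRow n p.1 p.2 (getRow G n u)).1.getD c false
        · rfl
        · exact absurd h hmid
      exact ih _ c h0' h1

-- ---- buildG facts ----
theorem getRow_cases (G : List (List Int)) (n u : Int) : getRow G n u ∈ G ∨ getRow G n u = [] := by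
  unfold getRow
  rcases lt_or_ge (cellIdx n u) G.length with h | h
  · left
    rw [List.getD_eq_getElem?_getD, List.getElem?_eq_getElem h]
    exact List.getElem_mem h
  · right
    exact pvGetD_oob G [] h

theorem mem_appendAt (G : List (List Int)) (n a b : Int) (l : List Int)
    (h : l ∈ appendAt G n a b) : l ∈ G ∨ l = getRow G n a ++ [b] := by
  unfold appendAt at h
  rcases List.mem_or_eq_of_mem_set h with h' | h'
  · exact Or.inl h'
  · exact Or.inr h'

theorem buildG_fold_inR (n : Int) :
    ∀ (conns : List (List Int)) (G : List (List Int)),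
    (∀ l ∈ G, ∀ y ∈ l, -n ≤ y ∧ y < n) →
    (∀ c ∈ conns, (-n ≤ c.getD 0 0 ∧ c.getD 0 0 < n) ∧ (-n ≤ c.getD 1 0 ∧ c.getD 1 0 < n)) →
    ∀ l ∈ (conns.foldl (fun G c => appendAt (appendAt G n (c.getD 0 0) (c.getD 1 0)) n (c.getD 1 0) (c.getD 0 0)) G),
      ∀ y ∈ l, -n ≤ y ∧ y < n := by
  intro conns
  induction conns with
  | nil => intro G hG _ l hl; exact hG l hl
  | cons c conns ih =>
    intro G hG hc l hl
    rw [List.foldl_cons] at hl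
    refine ih _ ?_ (fun d hd => hc d (List.mem_cons_of_mem _ hd)) l hl
    intro l' hl' y hy
    have hc0 := (hc c List.mem_cons_self).1
    have hc1 := (hc c List.mem_cons_self).2
    rcases mem_appendAt _ n _ _ _ hl' with hl'' | rfl
    · rcases mem_appendAt _ n _ _ _ hl'' with hl''' | rfl
      · exact hG l' hl''' y hy
      · rcases List.mem_append.mp hy with hy' | hy'
        · rcases getRow_cases G n (c.getD 0 0) with hr | hr
          · exact hG _ hr y hy'
          · rw [hr] at hy'; simp at hy'
        · have : y = c.getD 1 0 := by simpa using hy'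
          subst this; exact hc1
    · rcases List.mem_append.mp hy with hy' | hy'
      · rcases getRow_cases _ n (c.getD 1 0) with hr | hr
        · rcases mem_appendAt _ n _ _ _ hr with hr' | hr'
          · exact hG _ hr' y hy'
          · rw [hr'] at hy'
            rcases List.mem_append.mp hy' with hy'' | hy''
            · rcases getRow_cases G n (c.getD 0 0) with hr'' | hr''
              · exact hG _ hr'' y hy''
              · rw [hr''] at hy''; simp at hy''
            · have : y = c.getD 1 0 := by simpa using hy''
              subst this; exact hc1
        · rw [hr] at hy'; simp at hy'
      · have : y = c.getD 0 0 := by simpa using hy'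
        subst this; exact hc0

theorem buildG_fold_rowlen (n : Int) :
    ∀ (conns : List (List Int)) (G : List (List Int)) (B : Nat),
    (∀ l ∈ G, l.length ≤ B) →
    ∀ l ∈ (conns.foldl (fun G c => appendAt (appendAt G n (c.getD 0 0) (c.getD 1 0)) n (c.getD 1 0) (c.getD 0 0)) G),
      l.length ≤ B + 2 * conns.length := by
  intro conns
  induction conns with
  | nil => intro G B hG l hl; simpa using hG l hl
  | cons c conns ih =>
    intro G B hG l hl
    rw [List.foldl_cons] at hl
    have hstep : ∀ l' ∈ appendAt (appendAt G n (c.getD 0 0) (c.getD 1 0)) n (c.getD 1 0) (c.getD 0 0), l'.length ≤ B + 2 := by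
      intro l' hl'
      have hmid : ∀ l'' ∈ appendAt G n (c.getD 0 0) (c.getD 1 0), l''.length ≤ B + 1 := by
        intro l'' hl''
        rcases mem_appendAt _ n _ _ _ hl'' with h | rfl
        · exact le_trans (hG _ h) (by omega)
        · rcases getRow_cases G n (c.getD 0 0) with hr | hr
          · simp only [List.length_append, List.length_cons, List.length_nil]
            have := hG _ hr; omega
          · rw [hr]; simp
      rcases mem_appendAt _ n _ _ _ hl' with h | rfl
      · exact le_trans (hmid _ h) (by omega)
      · rcases getRow_cases _ n (c.getD 1 0) with hr | hr
        · simp only [List.length_append, List.length_cons, List.length_nil]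
          have := hmid _ hr; omega
        · rw [hr]; simp
    have := ih _ (B + 2) hstep l hl
    simp only [List.length_cons] at *
    omega

-- ---- one unfolding of B's while loop ----
theorem loopB_succ (G : List (List Int)) (n : Int) (f : Nat) (vis : List Bool) (mc : List Int)
    (fr : List Int) (day : Int) :
    loopB G n (f + 1) vis mc fr day
      = if fr.isEmpty then mc
        else loopB G n f (collect G n vis fr).1
          (if (collect G n vis fr).2.isEmpty then mc
           else mc.set day.toNat ((collect G n vis fr).2.length : Int))
          (collect G n vis fr).2 (day + 1) := rfl

-- ---- the coupling of A's queue run with B's frontier run ----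
theorem couple (G : List (List Int)) (n : Int) (L : Nat) (hn1 : 1 ≤ n)
    (hGr : ∀ u : Int, ∀ x ∈ getRow G n u, -n ≤ x ∧ x < n)
    (hGrl : ∀ u : Int, (getRow G n u).length ≤ L) :
    ∀ k : Nat, ∀ (vis visB : List Bool) (mc : List Int) (S F : List Int) (day : Int)
      (fuelA fuelB : Nat),
    vis.count false = k →
    vis.length = n.toNat →
    visB.length = n.toNat →
    mc.length = n.toNat + 1 →
    (∀ x ∈ S, -n ≤ x ∧ x < n) →
    (∀ x ∈ F, getCell vis n x = false) →
    (∀ c : Nat, visB.getD c false = (vis.getD c false || F.any (fun u => cellIdx n u == c))) →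
    vis.count false = visB.count false + F.length →
    (∀ x ∈ S, getCell vis n x = true ∨ F.any (fun u => cellIdx n u == cellIdx n x) = true) →
    (∀ x ∈ F, ∃ y ∈ S, cellIdx n y = cellIdx n x) →
    (∀ u : Int, getCell vis n u = true → ∀ x ∈ getRow G n u,
       getCell vis n x = true ∨ F.any (fun w => cellIdx n w == cellIdx n x) = true) →
    (∀ j : Nat, day.toNat ≤ j → mc.getD j 0 = 0) →
    1 ≤ day →
    day + (k : Int) ≤ n + 1 →
    (S.length + 1) * (L + 2) ^ (k + 1) ≤ fuelA →
    k + 2 ≤ fuelB →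
    loopA G n fuelA vis mc (S.map (fun u => (day, u)))
      = loopB G n fuelB visB (mc.set day.toNat (F.length : Int)) F (day + 1) := by
  intro k
  induction k using Nat.strong_induction_on with
  | _ k IH =>
  intro vis visB mc S F day fuelA fuelB hk hvl hvBl hmcl hS hFv hPt hCnt h5 h6 h7 hmz hd1 hdk hfA hfB
  have hSc : ∀ u ∈ S, cellIdx n u < vis.length := fun u hu => by
    rw [hvl]; exact cellIdx_lt (hS u hu).1 (hS u hu).2
  obtain ⟨fΔ, hmc1, hcnt1⟩ := procBlock_mc G n day S (vis, mc, []) hSc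
  have hcnt1 : List.count false vis = List.count false (procBlock G n day (vis, mc, []) S).1 + fΔ := hcnt1
  have hmc1 : (procBlock G n day (vis, mc, []) S).2.1
      = mc.set day.toNat (mc.getD day.toNat 0 + (fΔ : Int)) := hmc1
  have hv1 : ∀ c : Nat, (procBlock G n day (vis, mc, []) S).1.getD c false
      = (vis.getD c false || S.any (fun u => cellIdx n u == c)) :=
    procBlock_vis_getD G n day S (vis, mc, []) hSc
  -- the block marks exactly the frontier's cells
  have hAnyEq : ∀ c : Nat, (vis.getD c false || S.any (fun u => cellIdx n u == c))
      = (vis.getD c false || F.any (fun u => cellIdx n u == c)) := by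
    intro c
    cases hvc : vis.getD c false with
    | true => simp
    | false =>
      simp only [Bool.false_or]
      cases hsc : S.any (fun u => cellIdx n u == c) with
      | true =>
        obtain ⟨u, hu, hbc⟩ := List.any_eq_true.mp hsc
        have hcix : cellIdx n u = c := by simpa using hbc
        rcases h5 u hu with hvis | hany
        · exfalso
          unfold getCell at hvis
          rw [hcix] at hvis
          rw [hvis] at hvc
          simp at hvc
        · rw [← hcix]
          obtain ⟨w, hw, hbw⟩ := List.any_eq_true.mp hany
          symm
          apply List.any_eq_true.mpr
          exact ⟨w, hw, hbw⟩
      | false =>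
        symm
        cases hfc : F.any (fun u => cellIdx n u == c) with
        | false => rfl
        | true =>
          exfalso
          obtain ⟨x, hx, hbx⟩ := List.any_eq_true.mp hfc
          have hcx : cellIdx n x = c := by simpa using hbx
          obtain ⟨y, hy, hcy⟩ := h6 x hx
          have : S.any (fun u => cellIdx n u == c) = true :=
            List.any_eq_true.mpr ⟨y, hy, by simp [hcy, hcx]⟩
          rw [this] at hsc
          simp at hsc
  have hvisEq : (procBlock G n day (vis, mc, []) S).1 = visB := by
    apply pvEq_of_getD false
    · rw [procBlock_vis_len]
      show vis.length = visB.length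
      rw [hvl, hvBl]
    · intro c
      rw [hv1 c, hAnyEq c, ← hPt c]
  have hfΔ : fΔ = F.length := by
    rw [hvisEq] at hcnt1
    omega
  have hmcB : (procBlock G n day (vis, mc, []) S).2.1 = mc.set day.toNat (F.length : Int) := by
    rw [hmc1, hfΔ, hmz day.toNat (le_refl _), zero_add]
  have hpow1 : 1 ≤ (L + 2) ^ (k + 1) := Nat.one_le_pow _ _ (by omega)
  have hfA1 : S.length + 1 ≤ fuelA := by
    have : (S.length + 1) * 1 ≤ (S.length + 1) * (L + 2) ^ (k + 1) :=
      Nat.mul_le_mul_left _ hpow1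
    omega
  have hfuelA : fuelA = S.length + (fuelA - S.length) := by omega
  have hblock := loopA_block G n day S (fuelA - S.length) vis mc []
  simp only [List.map_nil, List.append_nil] at hblock
  rw [hfuelA, hblock, hmcB]
  cases hFc : F with
  | nil =>
    -- no new frontier: A's residual block marks nothing and queues nothing; both sides return mc
    subst hFc
    have haccnil : (procBlock G n day (vis, mc, []) S).2.2 = [] := by
      rw [List.eq_nil_iff_forall_not_mem]
      intro x hx
      rcases procBlock_acc_sub G n day vis S (vis, mc, []) (fun c hc => hc) x hx with h | ⟨u, hu, hrow, hcx⟩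
      · simp at h
      · rcases h5 u hu with hvis | hany
        · rcases h7 u hvis x hrow with h' | h'
          · rw [h'] at hcx; simp at hcx
          · simp at h'
        · simp at hany
    rw [haccnil]
    simp only [List.map_nil]
    rw [loopA_nil G n _ _ (by omega)]
    have hfB1 : fuelB = (fuelB - 1) + 1 := by omega
    rw [hfB1, loopB_succ]
    simp only [List.isEmpty_nil, if_true, List.length_nil, Nat.cast_zero]
  | cons f0 F' =>
    rw [← hFc]
    have hFne : F ≠ [] := by rw [hFc]; simp
    have hFlen1 : 1 ≤ F.length := by rw [hFc]; simp
    have hkF : F.length ≤ k := by omega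
    have hk1 : 1 ≤ k := by omega
    -- abbreviations for the A-block result and B's collect result
    set P := procBlock G n day (vis, mc, []) S with hP
    set cf := collect G n visB F with hcf
    have hcfold : cf = cfold G n (visB, []) F := rfl
    have hGc : ∀ u ∈ F, ∀ x ∈ getRow G n u, cellIdx n x < (visB, ([]:List Int)).1.length := by
      intro u _ x hx
      have := hGr u x hx
      show cellIdx n x < visB.length
      rw [hvBl]; exact cellIdx_lt this.1 this.2
    -- day is a valid index while the frontier is nonempty
    have hkvB : vis.count false = visB.count false + F.length := hCnt
    have hdn : day ≤ n := by omega
    have hdNat : day.toNat < mc.length := by rw [hmcl]; omega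
    have hd1' : (day + 1).toNat = day.toNat + 1 := by omega
    -- B side: one unfolding of the while loop
    have hfB1 : fuelB = (fuelB - 1) + 1 := by omega
    rw [hfB1, loopB_succ]
    rw [if_neg (by rw [hFc]; simp)]
    rw [← hcf]
    -- next-round data
    have hvis2len : cf.1.length = n.toNat := by rw [hcfold, cfold_vis_len]; exact hvBl
    have hP1len : P.1.length = n.toNat := by rw [hP, procBlock_vis_len]; exact hvl
    have hPvB : P.1 = visB := hvisEq
    have hmcBlen : (mc.set day.toNat (F.length : Int)).length = n.toNat + 1 := by
      rw [List.length_set]; exact hmcl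
    -- the new accumulator of A and frontier of B
    have hNacc_sub := procBlock_acc_sub G n day vis S (vis, mc, []) (fun c hc => hc)
    have hF2_sub := cfold_acc_sub G n visB F (visB, []) (fun c hc => hc)
    have hS' : ∀ x ∈ P.2.2, -n ≤ x ∧ x < n := by
      intro x hx
      rcases hNacc_sub x hx with h | ⟨u, _, hrow, _⟩
      · simp at h
      · exact hGr u x hrow
    have hF2v : ∀ x ∈ cf.2, getCell P.1 n x = false := by
      intro x hx
      rw [hPvB]
      rcases hF2_sub x (by rw [hcfold] at hx; exact hx) with h | ⟨u, _, _, hc⟩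
      · simp at h
      · exact hc
    have hF2inR : ∀ x ∈ cf.2, -n ≤ x ∧ x < n := by
      intro x hx
      rcases hF2_sub x (by rw [hcfold] at hx; exact hx) with h | ⟨u, _, hrow, _⟩
      · simp at h
      · exact hGr u x hrow
    -- pointwise description of B's visited list after collect
    have hv2 : ∀ c : Nat, cf.1.getD c false
        = (visB.getD c false || F.any (fun u => (getRow G n u).any (fun x => cellIdx n x == c))) := by
      intro c
      rw [hcfold]
      exact cfold_vis_getD G n F (visB, []) hGc c
    have hPt' : ∀ c : Nat, cf.1.getD c false
        = (P.1.getD c false || cf.2.any (fun u => cellIdx n u == c)) := by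
      intro c
      rw [hPvB, hv2 c]
      cases hvb : visB.getD c false with
      | true => simp [hvb]
      | false =>
        simp only [Bool.false_or]
        cases hnbr : F.any (fun u => (getRow G n u).any (fun x => cellIdx n x == c)) with
        | true =>
          have hv2t : cf.1.getD c false = true := by rw [hv2 c, hvb, hnbr]; rfl
          obtain ⟨y, hy, hcy⟩ := cfold_c G n F (visB, []) c hvb (by rw [hcfold] at hv2t; exact hv2t)
          symm
          apply List.any_eq_true.mpr
          exact ⟨y, by rw [hcfold]; exact hy, by simp [hcy]⟩
        | false =>
          symm
          cases hf2 : cf.2.any (fun u => cellIdx n u == c) with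
          | false => rfl
          | true =>
            exfalso
            obtain ⟨y, hy, hby⟩ := List.any_eq_true.mp hf2
            have hcy : cellIdx n y = c := by simpa using hby
            rcases hF2_sub y (by rw [hcfold] at hy; exact hy) with h | ⟨u, hu, hrow, _⟩
            · simp at h
            · have : F.any (fun u => (getRow G n u).any (fun x => cellIdx n x == c)) = true :=
                List.any_eq_true.mpr ⟨u, hu, List.any_eq_true.mpr ⟨y, hrow, by simp [hcy]⟩⟩
              rw [this] at hnbr
              simp at hnbr
    -- counting: the collect adds exactly |cf.2| newly visited cells
    have hCnt' : P.1.count false = cf.1.count false + cf.2.length := by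
      have := cfold_count G n F (visB, []) hGc
      rw [← hcfold] at this
      simp only [List.length_nil, add_zero] at this
      rw [hPvB]
      omega
    have hk' : P.1.count false = k - F.length := by
      rw [hPvB]; omega
    -- support of the new block lies in (new visited) ∪ (new frontier)
    have h5' : ∀ x ∈ P.2.2, getCell P.1 n x = true ∨ (cf.2.any (fun u => cellIdx n u == cellIdx n x)) = true := by
      intro x hx
      by_cases hx1 : getCell P.1 n x = true
      · exact Or.inl hx1
      · have hx1f : P.1.getD (cellIdx n x) false = false := by
          cases h : P.1.getD (cellIdx n x) false
          · rfl
          · exact absurd h hx1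
        have hxB : visB.getD (cellIdx n x) false = false := by rw [← hPvB]; exact hx1f
        have hxv : vis.getD (cellIdx n x) false = false := by
          cases h : vis.getD (cellIdx n x) false
          · rfl
          · rw [hPt (cellIdx n x), h] at hxB; simp at hxB
        have hxF : F.any (fun u => cellIdx n u == cellIdx n x) = false := by
          cases h : F.any (fun u => cellIdx n u == cellIdx n x)
          · rfl
          · rw [hPt (cellIdx n x), h] at hxB; simp at hxB
        rcases hNacc_sub x hx with h | ⟨u, hu, hrow, hcx⟩
        · simp at h
        · rcases h5 u hu with hvisu | hanyu
          · rcases h7 u hvisu x hrow with h' | h'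
            · exfalso; unfold getCell at h'; rw [h'] at hxv; simp at hxv
            · exfalso; rw [h'] at hxF; simp at hxF
          · obtain ⟨w, hw, hbw⟩ := List.any_eq_true.mp hanyu
            have hcw : cellIdx n w = cellIdx n u := by simpa using hbw
            have hrow' : x ∈ getRow G n w := by rw [getRow_congr G n hcw]; exact hrow
            have hv2t : cf.1.getD (cellIdx n x) false = true := by
              rw [hv2, hxB]
              simp only [Bool.false_or]
              exact List.any_eq_true.mpr ⟨w, hw, List.any_eq_true.mpr ⟨x, hrow', by simp⟩⟩
            obtain ⟨y, hy, hcy⟩ := cfold_c G n F (visB, []) (cellIdx n x) hxB (by rw [hcfold] at hv2t; exact hv2t)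
            exact Or.inr (List.any_eq_true.mpr ⟨y, by rw [hcfold]; exact hy, by simp [hcy]⟩)
    -- every new-frontier cell occurs in the new block
    have h6' : ∀ x ∈ cf.2, ∃ y ∈ P.2.2, cellIdx n y = cellIdx n x := by
      intro x hx
      rcases hF2_sub x (by rw [hcfold] at hx; exact hx) with h | ⟨u, hu, hrow, hcu⟩
      · simp at h
      · obtain ⟨y, hy, hcy⟩ := h6 u hu
        have hrow' : x ∈ getRow G n y := by rw [getRow_congr G n hcy]; exact hrow
        refine ⟨x, ?_, rfl⟩
        apply procBlock_acc_super G n day S (vis, mc, []) y hy x hrow'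
        show getCell P.1 n x = false
        rw [hPvB]; exact hcu
    -- closure of the new visited set
    have h7' : ∀ u : Int, getCell P.1 n u = true → ∀ x ∈ getRow G n u,
        getCell P.1 n x = true ∨ (cf.2.any (fun w => cellIdx n w == cellIdx n x)) = true := by
      intro u hu x hx
      have hvBu : visB.getD (cellIdx n u) false = true := by rw [← hPvB]; exact hu
      rw [hPt (cellIdx n u)] at hvBu
      have hside : getCell P.1 n x = true ∨ cf.1.getD (cellIdx n x) false = true := by
        rcases Bool.or_eq_true_iff.mp hvBu with hvu | hFu
        · rcases h7 u hvu x hx with h' | h'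
          · left
            show P.1.getD (cellIdx n x) false = true
            rw [hPvB, hPt (cellIdx n x)]
            unfold getCell at h'
            rw [h']; rfl
          · left
            show P.1.getD (cellIdx n x) false = true
            rw [hPvB, hPt (cellIdx n x), h']
            simp
        · obtain ⟨w, hw, hbw⟩ := List.any_eq_true.mp hFu
          have hcw : cellIdx n w = cellIdx n u := by simpa using hbw
          have hrow' : x ∈ getRow G n w := by rw [getRow_congr G n hcw]; exact hx
          right
          rw [hv2]
          apply Bool.or_eq_true_iff.mpr
          exact Or.inr (List.any_eq_true.mpr ⟨w, hw, List.any_eq_true.mpr ⟨x, hrow', by simp⟩⟩)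
      rcases hside with h | h
      · exact Or.inl h
      · by_cases hPx : getCell P.1 n x = true
        · exact Or.inl hPx
        · have hPxf : P.1.getD (cellIdx n x) false = false := by
            cases hc : P.1.getD (cellIdx n x) false
            · rfl
            · exact absurd hc hPx
          rw [hPt' (cellIdx n x), hPxf] at h
          simp only [Bool.false_or] at h
          exact Or.inr h
    -- zeros above the next day
    have hmz' : ∀ j : Nat, (day + 1).toNat ≤ j → (mc.set day.toNat (F.length : Int)).getD j 0 = 0 := by
      intro j hj
      rw [hd1'] at hj
      rw [pvGetD_set_ne mc _ 0 (by omega)]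
      exact hmz j (by omega)
    -- fuel bookkeeping
    have hNlen : P.2.2.length ≤ S.length * L := by
      have := procBlock_acc_len G n day L hGrl S (vis, mc, [])
      simpa using this
    have hpowle : (L + 2) ^ ((k - F.length) + 1) ≤ (L + 2) ^ k :=
      Nat.pow_le_pow_right (by omega) (by omega)
    have hpowk : 1 ≤ (L + 2) ^ k := Nat.one_le_pow _ _ (by omega)
    have hmul : (P.2.2.length + 1) * (L + 2) ^ ((k - F.length) + 1)
        ≤ (S.length * L + 1) * (L + 2) ^ k := Nat.mul_le_mul (by omega) hpowle
    have e1 : (S.length + 1) * (L + 2) ^ (k + 1)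
        = (S.length * L + 1) * (L + 2) ^ k + (2 * S.length + L + 1) * (L + 2) ^ k := by
      rw [pow_succ]; ring
    have e2 : S.length ≤ (2 * S.length + L + 1) * (L + 2) ^ k := by
      calc S.length ≤ (2 * S.length + L + 1) * 1 := by omega
        _ ≤ (2 * S.length + L + 1) * (L + 2) ^ k := Nat.mul_le_mul_left _ hpowk
    have hfA' : (P.2.2.length + 1) * (L + 2) ^ ((k - F.length) + 1) ≤ fuelA - S.length := by
      omega
    -- the inner write of B agrees with the accumulated counts of A
    have hmcw : (if cf.2.isEmpty then mc.set day.toNat (F.length : Int)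
          else (mc.set day.toNat (F.length : Int)).set (day + 1).toNat (cf.2.length : Int))
        = (mc.set day.toNat (F.length : Int)).set (day + 1).toNat (cf.2.length : Int) := by
      cases hce : cf.2 with
      | nil =>
        simp only [List.isEmpty_nil, if_true, List.length_nil, Nat.cast_zero]
        have hz : (mc.set day.toNat (F.length : Int)).getD (day + 1).toNat 0 = 0 :=
          hmz' _ (le_refl _)
        conv_rhs => rw [show (0:Int) = (mc.set day.toNat (F.length : Int)).getD (day + 1).toNat 0 from hz.symm]
        exact (pvSet_getD_self _ _ 0).symm
      | cons a l =>
        rw [if_neg (by simp)]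
    rw [hmcw]
    -- apply the induction hypothesis at the strictly smaller false-count
    have hIH := IH (k - F.length) (by omega) P.1 cf.1 (mc.set day.toNat (F.length : Int))
      P.2.2 cf.2 (day + 1) (fuelA - S.length) (fuelB - 1)
      hk' hP1len hvis2len hmcBlen hS' hF2v hPt' hCnt' h5' h6' h7' hmz'
      (by omega) (by push_cast; omega) hfA' (by omega)
    exact hIH


theorem pvGetD_replicate {α : Type} (m c : Nat) (x : α) : (List.replicate m x).getD c x = x := by
  rcases lt_or_ge c m with h | h
  · rw [List.getD_eq_getElem?_getD, List.getElem?_replicate]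
    simp [h]
  · exact pvGetD_oob _ _ (by simpa using h)

-- ===== VERDICT (by name: the statement is the Claim_ definition above) =====
theorem message_spec : Claim_equal_message := by
  unfold Claim_equal_message Spec_message
  intro conns n hDom hPre
  obtain ⟨hn1, hconn⟩ := hPre
  unfold message message_alt
  set G := buildG conns n with hG
  set N := n.toNat with hN
  have hN1 : 1 ≤ N := by omega
  have hNn : (N : Int) = n := by omega
  set L := 2 * conns.length with hL
  -- graph facts
  have hGmem : ∀ l ∈ G, ∀ y ∈ l, -n ≤ y ∧ y < n := by
    rw [hG]
    unfold buildG
    apply buildG_fold_inR n conns (List.replicate n.toNat [])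
    · intro l hl y hy
      have : l = [] := List.eq_of_mem_replicate hl
      subst this; simp at hy
    · intro c hc
      obtain ⟨_, h0, h1, h2, h3⟩ := hconn c hc
      exact ⟨⟨h0, h1⟩, ⟨h2, h3⟩⟩
  have hGr : ∀ u : Int, ∀ x ∈ getRow G n u, -n ≤ x ∧ x < n := by
    intro u x hx
    rcases getRow_cases G n u with h | h
    · exact hGmem _ h x hx
    · rw [h] at hx; simp at hx
  have hGrl : ∀ u : Int, (getRow G n u).length ≤ L := by
    intro u
    rcases getRow_cases G n u with h | h
    · have : ∀ l ∈ G, l.length ≤ 0 + 2 * conns.length := by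
        rw [hG]
        unfold buildG
        apply buildG_fold_rowlen n conns (List.replicate n.toNat []) 0
        intro l hl
        have : l = [] := List.eq_of_mem_replicate hl
        subst this; simp
      have := this _ h
      omega
    · rw [h]; simp
  -- initial data
  have hvl : (List.replicate N false).length = N := by simp
  have hcix0 : cellIdx n 0 = 0 := by unfold cellIdx; simp
  have hrep : ∀ c : Nat, (List.replicate N false).getD c false = false := fun c => pvGetD_replicate N c false
  have h0N : 0 < N := by omega
  have hcouple := couple G n L hn1 hGr hGrl N
    (List.replicate N false) ((List.replicate N false).set 0 true)
    (List.replicate (N + 1) (0 : Int)) [0] [0] 1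
    ((2 * conns.length + 2) ^ (N + 2)) (N + 2)
    (by simp)
    (by simp [hN])
    (by simp [hN])
    (by simp [hN])
    (by intro x hx
        have hx0 : x = 0 := by simpa using hx
        subst hx0
        exact ⟨by omega, by omega⟩)
    (by intro x hx
        have hx0 : x = 0 := by simpa using hx
        subst hx0
        show (List.replicate N false).getD (cellIdx n 0) false = false
        exact hrep _)
    (by intro c
        rw [List.any_cons, List.any_nil, Bool.or_false, hrep c, Bool.false_or, hcix0]
        by_cases hc : 0 = c
        · subst hc
          rw [pvGetD_set_self _ _ _ (by simpa using h0N)]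
          simp
        · rw [pvGetD_set_ne _ _ _ hc, hrep c]
          simp [hc])
    (by have h := pvCount_false_set_true (List.replicate N false) (i := 0) (by simpa using h0N) (hrep 0)
        simpa using h)
    (by intro x hx
        have hx0 : x = 0 := by simpa using hx
        subst hx0
        right; simp)
    (by intro x hx
        have hx0 : x = 0 := by simpa using hx
        subst hx0
        exact ⟨0, by simp⟩)
    (by intro u hu
        exfalso
        have : (List.replicate N false).getD (cellIdx n u) false = false := hrep _
        rw [show getCell (List.replicate N false) n u = (List.replicate N false).getD (cellIdx n u) false from rfl, this] at hu
        simp at hu)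
    (by intro j _; exact pvGetD_replicate (N + 1) j 0)
    (by omega)
    (by rw [show ((N : Nat) : Int) = n from hNn]; omega)
    (by rw [show L + 2 = 2 * conns.length + 2 from rfl, pow_succ]
        calc ([0].length (α := Int) + 1) * (2 * conns.length + 2) ^ (N + 1)
            = 2 * (2 * conns.length + 2) ^ (N + 1) := by simp
          _ ≤ (2 * conns.length + 2) ^ (N + 1) * (2 * conns.length + 2) := by
              rw [Nat.mul_comm]
              have h2 : 2 ≤ 2 * conns.length + 2 := by omega
              exact Nat.mul_le_mul (le_refl ((2 * conns.length + 2) ^ (N + 1))) h2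
          _ = (2 * conns.length + 2) ^ (N + 2) := by rw [← pow_succ])
    (le_refl _)
  have hq : ([0] : List Int).map (fun u => ((1 : Int), u)) = [((1 : Int), (0 : Int))] := rfl
  rw [hq] at hcouple
  have hw : (List.replicate (N + 1) (0 : Int)).set (1 : Int).toNat (([0].length (α := Int)) : Int)
      = (List.replicate (N + 1) (0 : Int)).set 1 1 := by norm_num
  rw [hw] at hcouple
  rw [show (1 : Int) + 1 = 2 from rfl] at hcouple
  show finalScan n (loopA G n ((L + 2) ^ (N + 2)) (List.replicate N false) (List.replicate (N + 1) 0) [(1, 0)]) = finalScan n (loopB G n (N + 2) ((List.replicate N false).set 0 true) ((List.replicate (N + 1) 0).set 1 1) [0] 2)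
  rw [show L + 2 = 2 * conns.length + 2 from rfl, hcouple]
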